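-- pv_equiv track=rewrite | github.com/matej-parizek/CTU-FEL-ALP | play.py | checky
-- ===== SOURCE A (Python) =====
-- def checky(m):
--     r1 =None
--     s1=None
--     for r in range(len(m)-4):
--         for s in range(len(m)):
--             if m[r][s]==1 and m[r+1][s]==1 and m[r+2][s]==1 and m[r+3][s]==1 and m[r+4][s]==0:
--                 s1=s
--                 r1=r+4
--             if m[r][s] == 1 and m[r+1][s] == 1 and m[r+2][s] == 1 and m[r+3][s] == 0 and m[r+4][s] == 1:
--                 s1 = s
--                 r1 = r+3
--             if m[r][s] == 1 and m[r+1][s] == 1 and m[r+2][s] == 0 and m[r+3][s ] == 1 and m[r+4][s] == 1: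
--                 s1 = s
--                 r1 = r+2
--             if m[r][s] == 1 and m[r+1][s] == 0 and m[r+2][s] == 1 and m[r+3][s] == 1 and m[r+4][s] == 1:
--                 s1 = s
--                 r1 = r+1
--             if m[r][s] == 0 and m[r+1][s ] == 1 and m[r+2][s] == 1 and m[r+3][s ] == 1 and m[r+4][s] == 1:
--                 s1 = s
--                 r1 = r
--     return ( r1,s1)
-- ===== SOURCE B (Python) =====
-- def checky(m):
--     # Column-major sliding-window algorithm: per column build prefix counts of 1s/0s and a
--     # last-zero index array, test each 5-row window in O(1) by prefix differences, take the
--     # deepest window per column (descending scan, early break), and keep the overall best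
--     # across columns (later column wins ties), recovering the gap row from last0.
--     n = len(m)
--     if n < 5:
--         return (None, None)
--     best = None  # (window start row, gap row, column)
--     for s in range(n):
--         p1 = [0]
--         p0 = [0]
--         last0 = []
--         lz = -1
--         for r in range(n):
--             v = m[r][s]
--             p1.append(p1[-1] + (v == 1))
--             p0.append(p0[-1] + (v == 0))
--             if v == 0:
--                 lz = r
--             last0.append(lz)
--         for r in range(n - 5, -1, -1):
--             if p1[r + 5] - p1[r] == 4 and p0[r + 5] - p0[r] == 1:
--                 if best is None or r >= best[0]:
--                     best = (r, last0[r + 4], s)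
--                 break
--     return (best[1], best[2]) if best is not None else (None, None)
-- ===== Notes on version B (the rewrite author's own statement) =====
-- stated objective: alternative
-- what changed: B replaces A's row-major window scan with five pattern branches by a column-major prefix-sum algorithm: per column it builds prefix counts of 1s and 0s plus a last-zero-index array in one pass, tests each 5-row window in O(1) by prefix differences, takes the deepest window per column with an early-break descending scan, keeps the best (deepest, then rightmost) column, and reads the gap row off the last-zero array.
-- outside the precondition, e.g. on checky([[2, 2, 2, 2, 2], [0], [0], [0], [0]]): A returns (None, None), B raises IndexError
import Mathlib
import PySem

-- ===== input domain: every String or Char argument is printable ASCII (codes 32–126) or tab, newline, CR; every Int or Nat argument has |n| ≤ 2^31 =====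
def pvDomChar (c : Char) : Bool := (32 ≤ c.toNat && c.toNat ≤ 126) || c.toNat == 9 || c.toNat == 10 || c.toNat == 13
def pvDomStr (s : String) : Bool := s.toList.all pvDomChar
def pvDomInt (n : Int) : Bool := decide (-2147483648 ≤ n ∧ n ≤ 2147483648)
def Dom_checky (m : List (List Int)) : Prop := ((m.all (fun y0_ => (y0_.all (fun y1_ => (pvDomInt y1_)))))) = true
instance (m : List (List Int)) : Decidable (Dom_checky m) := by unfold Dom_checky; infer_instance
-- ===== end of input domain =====

-- B replaces A's row-major scan with five pattern branches by a column-major prefix-sum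
-- algorithm: per column one pass builds prefix counts of 1s/0s and a last-zero index array,
-- each 5-row window is tested in O(1) by prefix differences, the deepest window per column is
-- found by a descending scan with early break, and the best column (deepest, then rightmost)
-- wins; the gap row is read off the last-zero array.

-- m[r][s]; total form of Python indexing (in range on every cell either port reads under Pre_)
def pvCell (m : List (List Int)) (r s : Int) : Int :=
  PySem.List.pyGetD (PySem.List.pyGetD m r []) s 0

-- ===== PORT A =====
def checky (m : List (List Int)) : Option Int × Option Int :=
  let n : Int := m.length
  (PySem.List.pyRange 0 (n - 4) 1).foldl (fun acc r =>
    (PySem.List.pyRange 0 n 1).foldl (fun acc s =>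
      let acc := if pvCell m r s = 1 ∧ pvCell m (r+1) s = 1 ∧ pvCell m (r+2) s = 1 ∧
                    pvCell m (r+3) s = 1 ∧ pvCell m (r+4) s = 0 then (some (r+4), some s) else acc
      let acc := if pvCell m r s = 1 ∧ pvCell m (r+1) s = 1 ∧ pvCell m (r+2) s = 1 ∧
                    pvCell m (r+3) s = 0 ∧ pvCell m (r+4) s = 1 then (some (r+3), some s) else acc
      let acc := if pvCell m r s = 1 ∧ pvCell m (r+1) s = 1 ∧ pvCell m (r+2) s = 0 ∧
                    pvCell m (r+3) s = 1 ∧ pvCell m (r+4) s = 1 then (some (r+2), some s) else acc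
      let acc := if pvCell m r s = 1 ∧ pvCell m (r+1) s = 0 ∧ pvCell m (r+2) s = 1 ∧
                    pvCell m (r+3) s = 1 ∧ pvCell m (r+4) s = 1 then (some (r+1), some s) else acc
      let acc := if pvCell m r s = 0 ∧ pvCell m (r+1) s = 1 ∧ pvCell m (r+2) s = 1 ∧
                    pvCell m (r+3) s = 1 ∧ pvCell m (r+4) s = 1 then (some r, some s) else acc
      acc) acc) ((none, none) : Option Int × Option Int)

-- ===== PORT B =====
def checky_alt (m : List (List Int)) : Option Int × Option Int :=
  let n : Int := m.length
  if n < 5 then (none, none) else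
  let best := (PySem.List.pyRange 0 n 1).foldl (fun (best : Option (Int × Int × Int)) s =>
    let st := (PySem.List.pyRange 0 n 1).foldl
      (fun (st : List Int × List Int × List Int × Int) r =>
        let v := pvCell m r s
        let p1 := st.1 ++ [PySem.List.pyGetD st.1 (-1) 0 + (if v = 1 then 1 else 0)]
        let p0 := st.2.1 ++ [PySem.List.pyGetD st.2.1 (-1) 0 + (if v = 0 then 1 else 0)]
        let lz := if v = 0 then r else st.2.2.2
        (p1, p0, st.2.2.1 ++ [lz], lz))
      (([0], [0], [], -1) : List Int × List Int × List Int × Int)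
    match (PySem.List.pyRange (n - 5) (-1) (-1)).find? (fun r =>
        decide (PySem.List.pyGetD st.1 (r + 5) 0 - PySem.List.pyGetD st.1 r 0 = 4 ∧
                PySem.List.pyGetD st.2.1 (r + 5) 0 - PySem.List.pyGetD st.2.1 r 0 = 1)) with
    | some r =>
        match best with
        | none => some (r, PySem.List.pyGetD st.2.2.1 (r + 4) 0, s)
        | some b => if b.1 ≤ r then some (r, PySem.List.pyGetD st.2.2.1 (r + 4) 0, s) else best
    | none => best) none
  match best with
  | some b => (some b.2.1, some b.2.2)
  | none => (none, none)

-- ===== PRECONDITION & SPEC =====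
-- Pre_ excludes the inputs on which A raises IndexError (a row shorter than len(m) that gets
-- indexed), stated in closed form: it also excludes the value-guarded corner where a short row
-- escapes A's indexing only because short-circuit evaluation stops earlier (B reads every cell).
def Pre_checky (m : List (List Int)) : Prop :=
  (m.length : Int) ≤ 4 ∨ ∀ row ∈ m, m.length ≤ row.length
instance (m : List (List Int)) : Decidable (Pre_checky m) := by unfold Pre_checky; infer_instance

def pvWitness_checky : List (List Int) :=
  [[1,1,1,1,1],[1,1,1,1,1],[0,1,1,1,1],[1,1,1,1,1],[1,1,1,1,1]]

def Spec_checky (m : List (List Int)) (out : Option Int × Option Int) : Prop := out = checky_alt m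
instance (m : List (List Int)) (out : Option Int × Option Int) : Decidable (Spec_checky m out) := by unfold Spec_checky; infer_instance

-- ===== CLAIM (what is proved, stated in full; the proofs are below) =====
def Claim_equal_checky : Prop := ∀ (m : List (List Int)), Dom_checky m → Pre_checky m → Spec_checky m (checky m)

-- ===== LEMMAS AND PROOFS =====

-- the 5-cell column window starting at row r, column s
def pvCol (m : List (List Int)) (r s : Int) : List Int :=
  [pvCell m r s, pvCell m (r+1) s, pvCell m (r+2) s, pvCell m (r+3) s, pvCell m (r+4) s]

abbrev pvHit (m : List (List Int)) (r s : Int) : Prop :=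
  PySem.List.count (pvCol m r s) 1 = 4 ∧ PySem.List.count (pvCol m r s) 0 = 1

-- the gap row of a hit window: r + (first index of 0 in the window)
def pvGap (m : List (List Int)) (r s : Int) : Int :=
  r + (((PySem.List.index? (pvCol m r s) 0).getD 0 : Nat) : Int)

def pvVal (m : List (List Int)) (r s : Int) : Option Int × Option Int :=
  (some (pvGap m r s), some s)

-- B's per-column quantities in closed form: prefix count of 1s (resp. 0s) among rows < i,
-- and the last row < k holding a 0 (-1 if none)
def pvC1 (m : List (List Int)) (s : Int) (i : Nat) : Int :=
  (((List.range i).countP (fun j : Nat => pvCell m (j : Int) s == 1) : Nat) : Int)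
def pvC0 (m : List (List Int)) (s : Int) (i : Nat) : Int :=
  (((List.range i).countP (fun j : Nat => pvCell m (j : Int) s == 0) : Nat) : Int)
def pvLz (m : List (List Int)) (s : Int) (k : Nat) : Int :=
  (List.range k).foldl (fun (a : Int) (j : Nat) => if pvCell m (j : Int) s = 0 then (j : Int) else a) (-1)
def pvP1 (m : List (List Int)) (s : Int) (n : Nat) : List Int := (List.range (n+1)).map (pvC1 m s)
def pvP0 (m : List (List Int)) (s : Int) (n : Nat) : List Int := (List.range (n+1)).map (pvC0 m s)
def pvL (m : List (List Int)) (s : Int) (n : Nat) : List Int :=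
  (List.range n).map (fun i => pvLz m s (i+1))

-- B's outer-loop step after the inner array-building fold is expressed in closed form
def pvStep (m : List (List Int)) (best : Option (Int × Int × Int)) (s : Int) :
    Option (Int × Int × Int) :=
  match (PySem.List.pyRange ((m.length : Int) - 5) (-1) (-1)).find? (fun r =>
      decide (PySem.List.pyGetD (pvP1 m s m.length) (r + 5) 0 - PySem.List.pyGetD (pvP1 m s m.length) r 0 = 4 ∧
              PySem.List.pyGetD (pvP0 m s m.length) (r + 5) 0 - PySem.List.pyGetD (pvP0 m s m.length) r 0 = 1)) with
  | some r =>
      match best with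
      | none => some (r, PySem.List.pyGetD (pvL m s m.length) (r + 4) 0, s)
      | some b => if b.1 ≤ r then some (r, PySem.List.pyGetD (pvL m s m.length) (r + 4) 0, s) else best
  | none => best

-- A's chain of five overwriting ifs, as one conditional update keyed by the count test
lemma chain5 (c0 c1 c2 c3 c4 r s : Int) (acc : Option Int × Option Int) :
    (let a1 := if c0 = 1 ∧ c1 = 1 ∧ c2 = 1 ∧ c3 = 1 ∧ c4 = 0 then (some (r+4), some s) else acc
     let a2 := if c0 = 1 ∧ c1 = 1 ∧ c2 = 1 ∧ c3 = 0 ∧ c4 = 1 then (some (r+3), some s) else a1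
     let a3 := if c0 = 1 ∧ c1 = 1 ∧ c2 = 0 ∧ c3 = 1 ∧ c4 = 1 then (some (r+2), some s) else a2
     let a4 := if c0 = 1 ∧ c1 = 0 ∧ c2 = 1 ∧ c3 = 1 ∧ c4 = 1 then (some (r+1), some s) else a3
     let a5 := if c0 = 0 ∧ c1 = 1 ∧ c2 = 1 ∧ c3 = 1 ∧ c4 = 1 then (some r, some s) else a4
     a5) = if PySem.List.count [c0,c1,c2,c3,c4] 1 = 4 ∧ PySem.List.count [c0,c1,c2,c3,c4] 0 = 1
           then (some (r + (((PySem.List.index? [c0,c1,c2,c3,c4] 0).getD 0 : Nat) : Int)), some s) else acc := by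
  simp only [PySem.List.count_eq, PySem.List.index?_eq_idxOf?]
  by_cases h0 : c0 = 1 <;> by_cases h1 : c1 = 1 <;> by_cases h2 : c2 = 1 <;>
    by_cases h3 : c3 = 1 <;> by_cases h4 : c4 = 1 <;>
    simp_all [List.count_cons, List.idxOf?, List.findIdx?_cons]

-- last write wins: a fold that conditionally overwrites equals first match of the reverse
lemma foldl_if_last {α β : Type} (p : α → Prop) [DecidablePred p] (f : α → β)
    (l : List α) (init : β) :
    l.foldl (fun acc x => if p x then f x else acc) init
      = ((l.reverse.find? (fun x => decide (p x))).map f).getD init := by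
  induction l generalizing init with
  | nil => simp
  | cons a l ih =>
      simp only [List.foldl_cons, List.reverse_cons, List.find?_append, ih]
      cases h : l.reverse.find? (fun x => decide (p x)) <;> by_cases hp : p a <;> simp [hp]

-- nested foldl as a fold over the list of index pairs
lemma foldl_pairs {α β γ : Type} (l1 : List α) (l2 : List β) (g : γ → α → β → γ) (init : γ) :
    l1.foldl (fun acc r => l2.foldl (fun acc s => g acc r s) acc) init
      = (l1.flatMap (fun r => l2.map (fun s => (r, s)))).foldl (fun acc p => g acc p.1 p.2) init := by
  induction l1 generalizing init with
  | nil => simp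
  | cons a l ih => simp [List.foldl_append, List.foldl_map, ih]

-- find? is unchanged under a pointwise-equal predicate
lemma find?_congr_mem {α : Type} (p q : α → Bool) (l : List α) (h : ∀ a ∈ l, p a = q a) :
    l.find? p = l.find? q := by
  induction l with
  | nil => rfl
  | cons a l ih =>
      simp only [List.find?_cons, h a (by simp)]
      cases hq : q a <;> simp [ih (fun x hx => h x (by simp [hx]))]

-- on a list sorted by R, find? returns an R-maximal match
lemma find?_max {α : Type} (R : α → α → Prop) (l : List α) (hl : l.Pairwise R)
    (p : α → Bool) (x : α) (h : l.find? p = some x) :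
    p x = true ∧ x ∈ l ∧ ∀ y ∈ l, p y = true → y = x ∨ R x y := by
  induction l with
  | nil => simp at h
  | cons a l ih =>
      rcases List.pairwise_cons.mp hl with ⟨ha, hl'⟩
      by_cases hpa : p a
      · simp only [List.find?_cons, hpa] at h
        obtain rfl : a = x := by simpa using h
        exact ⟨hpa, by simp, by
          intro y hy _
          rcases List.mem_cons.mp hy with rfl | hy'
          · exact Or.inl rfl
          · exact Or.inr (ha y hy')⟩
      · simp only [List.find?_cons, Bool.of_not_eq_true hpa] at h
        have h' : l.find? p = some x := by
          cases hpa' : p a with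
          | true => exact absurd hpa' hpa
          | false => simpa [hpa'] using h
        obtain ⟨h1, h2, h3⟩ := ih hl' h'
        refine ⟨h1, by simp [h2], ?_⟩
        intro y hy hpy
        rcases List.mem_cons.mp hy with rfl | hy'
        · exact absurd hpy hpa
        · exact h3 y hy' hpy

-- countdown ranges are strictly decreasing
lemma pairwise_gt_countdown (a b : Int) : (PySem.List.pyRange a b (-1)).Pairwise (· > ·) := by
  rw [PySem.List.pyRange_neg_one_eq_reverse, List.pairwise_reverse]
  simpa using PySem.List.pairwise_lt_pyRange_one (b+1) (a+1)

-- per-column step lemmas for the closed forms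
lemma pvC1_succ (m : List (List Int)) (s : Int) (k : Nat) :
    pvC1 m s (k+1) = pvC1 m s k + (if pvCell m (k : Int) s = 1 then 1 else 0) := by
  simp [pvC1, List.range_succ, List.countP_append, List.countP_cons]

lemma pvC0_succ (m : List (List Int)) (s : Int) (k : Nat) :
    pvC0 m s (k+1) = pvC0 m s k + (if pvCell m (k : Int) s = 0 then 1 else 0) := by
  simp [pvC0, List.range_succ, List.countP_append, List.countP_cons]

lemma pvLz_succ (m : List (List Int)) (s : Int) (k : Nat) :
    pvLz m s (k+1) = if pvCell m (k : Int) s = 0 then (k : Int) else pvLz m s k := by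
  simp [pvLz, List.range_succ, List.foldl_append]

lemma pvP1_last (m : List (List Int)) (s : Int) (n : Nat) :
    PySem.List.pyGetD (pvP1 m s n) (-1) 0 = pvC1 m s n := by
  rw [show pvP1 m s n = (List.range n).map (pvC1 m s) ++ [pvC1 m s n] by
        simp [pvP1, List.range_succ]]
  exact PySem.List.pyGetD_neg_one_append_singleton _ _ _

lemma pvP0_last (m : List (List Int)) (s : Int) (n : Nat) :
    PySem.List.pyGetD (pvP0 m s n) (-1) 0 = pvC0 m s n := by
  rw [show pvP0 m s n = (List.range n).map (pvC0 m s) ++ [pvC0 m s n] by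
        simp [pvP0, List.range_succ]]
  exact PySem.List.pyGetD_neg_one_append_singleton _ _ _

-- the inner array-building fold computes exactly the closed forms
lemma inner_eq (m : List (List Int)) (s : Int) (n : Nat) :
    (PySem.List.pyRange 0 (n : Int) 1).foldl
      (fun (st : List Int × List Int × List Int × Int) r =>
        let v := pvCell m r s
        let p1 := st.1 ++ [PySem.List.pyGetD st.1 (-1) 0 + (if v = 1 then 1 else 0)]
        let p0 := st.2.1 ++ [PySem.List.pyGetD st.2.1 (-1) 0 + (if v = 0 then 1 else 0)]
        let lz := if v = 0 then r else st.2.2.2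
        (p1, p0, st.2.2.1 ++ [lz], lz))
      (([0], [0], [], -1) : List Int × List Int × List Int × Int)
    = (pvP1 m s n, pvP0 m s n, pvL m s n, pvLz m s n) := by
  induction n with
  | zero => simp [pvP1, pvP0, pvL, pvLz, pvC1, pvC0, PySem.List.pyRange_one_eq_nil]
  | succ k ih =>
      rw [show ((k+1 : Nat) : Int) = (k : Int) + 1 by push_cast; ring,
          PySem.List.pyRange_one_succ_right (by positivity), List.foldl_append, ih]
      simp only [List.foldl_cons, List.foldl_nil]
      rw [pvP1_last, pvP0_last]
      refine Prod.ext ?_ (Prod.ext ?_ (Prod.ext ?_ ?_)) <;> simp only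
      · rw [show pvP1 m s (k+1) = (List.range (k+1)).map (pvC1 m s) ++ [pvC1 m s (k+1)] by
              simp [pvP1, List.range_succ], pvC1_succ]
        rfl
      · rw [show pvP0 m s (k+1) = (List.range (k+1)).map (pvC0 m s) ++ [pvC0 m s (k+1)] by
              simp [pvP0, List.range_succ], pvC0_succ]
        rfl
      · rw [show pvL m s (k+1) = pvL m s k ++ [pvLz m s (k+1)] by
              simp [pvL, List.range_succ], pvLz_succ]
      · rw [pvLz_succ]

-- the prefix-difference test over the window [t, t+5) is the window count
lemma window_c1 (m : List (List Int)) (s : Int) (t : Nat) :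
    pvC1 m s (t+5) - pvC1 m s t = (PySem.List.count (pvCol m (t : Int) s) 1 : Int) := by
  unfold pvC1
  rw [List.range_add, List.countP_append, List.countP_map, pvCol, PySem.List.count_eq]
  simp only [show List.range 5 = [0,1,2,3,4] from by decide, List.count_cons, List.count_nil,
    List.countP_cons, List.countP_nil, Function.comp_def, beq_iff_eq]
  push_cast
  simp only [add_zero]
  split_ifs <;> omega

lemma window_c0 (m : List (List Int)) (s : Int) (t : Nat) :
    pvC0 m s (t+5) - pvC0 m s t = (PySem.List.count (pvCol m (t : Int) s) 0 : Int) := by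
  unfold pvC0
  rw [List.range_add, List.countP_append, List.countP_map, pvCol, PySem.List.count_eq]
  simp only [show List.range 5 = [0,1,2,3,4] from by decide, List.count_cons, List.count_nil,
    List.countP_cons, List.countP_nil, Function.comp_def, beq_iff_eq]
  push_cast
  simp only [add_zero]
  split_ifs <;> omega

-- array lookups inside pvStep, resolved for indices in range
lemma hit_iff (m : List (List Int)) (s r : Int) (h0 : 0 ≤ r) (h5 : r + 5 ≤ (m.length : Int)) :
    (PySem.List.pyGetD (pvP1 m s m.length) (r + 5) 0 - PySem.List.pyGetD (pvP1 m s m.length) r 0 = 4 ∧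
     PySem.List.pyGetD (pvP0 m s m.length) (r + 5) 0 - PySem.List.pyGetD (pvP0 m s m.length) r 0 = 1)
    ↔ pvHit m r s := by
  obtain ⟨t, rfl⟩ : ∃ t : Nat, (t : Int) = r := ⟨r.toNat, Int.toNat_of_nonneg h0⟩
  have ht5 : t + 5 ≤ m.length := by omega
  have l1 : PySem.List.pyGetD (pvP1 m s m.length) ((t : Int) + 5) 0 = pvC1 m s (t+5) := by
    rw [show ((t : Int) + 5) = ((t+5 : Nat) : Int) by push_cast; ring, PySem.List.pyGetD_natCast]
    exact PySem.List.getD_map_range _ _ _ _ (by omega)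
  have l2 : PySem.List.pyGetD (pvP1 m s m.length) ((t : Int)) 0 = pvC1 m s t := by
    rw [PySem.List.pyGetD_natCast]
    exact PySem.List.getD_map_range _ _ _ _ (by omega)
  have l3 : PySem.List.pyGetD (pvP0 m s m.length) ((t : Int) + 5) 0 = pvC0 m s (t+5) := by
    rw [show ((t : Int) + 5) = ((t+5 : Nat) : Int) by push_cast; ring, PySem.List.pyGetD_natCast]
    exact PySem.List.getD_map_range _ _ _ _ (by omega)
  have l4 : PySem.List.pyGetD (pvP0 m s m.length) ((t : Int)) 0 = pvC0 m s t := by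
    rw [PySem.List.pyGetD_natCast]
    exact PySem.List.getD_map_range _ _ _ _ (by omega)
  rw [l1, l2, l3, l4, sub_eq_iff_eq_add, sub_eq_iff_eq_add, ← sub_eq_iff_eq_add,
      ← sub_eq_iff_eq_add, window_c1, window_c0]
  unfold pvHit
  omega

lemma pvLz_shift (m : List (List Int)) (s : Int) (t k : Nat) :
    pvLz m s (t+(k+1))
      = if pvCell m ((t : Int) + (k : Int)) s = 0 then (t : Int) + (k : Int)
        else pvLz m s (t+k) := by
  rw [show t+(k+1) = (t+k)+1 from rfl, pvLz_succ]
  push_cast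
  rfl

-- with exactly one 0 in the window, the last-zero array holds the gap row
lemma gap_eq (m : List (List Int)) (s r : Int) (h0 : 0 ≤ r) (h5 : r + 5 ≤ (m.length : Int))
    (hct : PySem.List.count (pvCol m r s) 0 = 1) :
    PySem.List.pyGetD (pvL m s m.length) (r + 4) 0 = pvGap m r s := by
  obtain ⟨t, rfl⟩ : ∃ t : Nat, (t : Int) = r := ⟨r.toNat, Int.toNat_of_nonneg h0⟩
  have l : PySem.List.pyGetD (pvL m s m.length) ((t : Int) + 4) 0 = pvLz m s (t+5) := by
    rw [show ((t : Int) + 4) = ((t+4 : Nat) : Int) by push_cast; ring, PySem.List.pyGetD_natCast]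
    exact PySem.List.getD_map_range _ _ _ _ (by omega)
  rw [l, show t+5 = t+(4+1) from rfl, pvLz_shift, show t+4 = t+(3+1) from rfl, pvLz_shift,
      show t+3 = t+(2+1) from rfl, pvLz_shift, show t+2 = t+(1+1) from rfl, pvLz_shift,
      show t+1 = t+(0+1) from rfl, pvLz_shift]
  rw [pvCol, PySem.List.count_eq] at hct
  unfold pvGap pvCol
  rw [PySem.List.index?_eq_idxOf?]
  simp only [List.count_cons, List.count_nil, beq_iff_eq] at hct
  push_cast
  split_ifs at hct ⊢ <;> simp_all [List.idxOf?, List.findIdx?_cons]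

-- pvStep in terms of pvHit / pvGap
lemma pvStep_spec (m : List (List Int)) (best : Option (Int × Int × Int)) (s : Int) :
    pvStep m best s
      = match (PySem.List.pyRange ((m.length : Int) - 5) (-1) (-1)).find?
            (fun r => decide (pvHit m r s)) with
        | some r =>
            match best with
            | none => some (r, pvGap m r s, s)
            | some b => if b.1 ≤ r then some (r, pvGap m r s, s) else best
        | none => best := by
  unfold pvStep
  rw [find?_congr_mem _ (fun r => decide (pvHit m r s)) _ (by
    intro r hr
    rw [PySem.List.mem_pyRange_neg_one] at hr
    simp only [decide_eq_decide]
    exact hit_iff m s r (by omega) (by omega))]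
  cases hf : (PySem.List.pyRange ((m.length : Int) - 5) (-1) (-1)).find?
      (fun r => decide (pvHit m r s)) with
  | none => rfl
  | some r =>
      have hhit : pvHit m r s := by simpa using List.find?_some hf
      have hmem := List.mem_of_find?_eq_some hf
      rw [PySem.List.mem_pyRange_neg_one] at hmem
      have hg : PySem.List.pyGetD (pvL m s m.length) (r + 4) 0 = pvGap m r s :=
        gap_eq m s r (by omega) (by omega) hhit.2
      cases best <;> simp [hg]

-- the invariant of B's outer fold: best is the lexicographically deepest-then-rightmost hit
-- among columns < k, with the correct gap
def pvInv (m : List (List Int)) (k : Int) : Option (Int × Int × Int) → Prop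
  | none => ∀ r s : Int, 0 ≤ r → r ≤ (m.length : Int) - 5 → 0 ≤ s → s < k → ¬ pvHit m r s
  | some b => 0 ≤ b.1 ∧ b.1 ≤ (m.length : Int) - 5 ∧ 0 ≤ b.2.2 ∧ b.2.2 < k ∧
      pvHit m b.1 b.2.2 ∧ b.2.1 = pvGap m b.1 b.2.2 ∧
      ∀ r' s' : Int, 0 ≤ r' → r' ≤ (m.length : Int) - 5 → 0 ≤ s' → s' < k →
        pvHit m r' s' → (r' < b.1 ∨ (r' = b.1 ∧ s' ≤ b.2.2))

lemma inv_fold (m : List (List Int)) (k : Nat) :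
    pvInv m (k : Int) ((PySem.List.pyRange 0 (k : Int) 1).foldl (pvStep m) none) := by
  induction k with
  | zero =>
      rw [PySem.List.pyRange_one_eq_nil (by omega)]
      intro r s _ _ _ h
      omega
  | succ k ih =>
      rw [show ((k+1 : Nat) : Int) = (k : Int) + 1 by push_cast; ring,
          PySem.List.pyRange_one_succ_right (by positivity), List.foldl_append]
      simp only [List.foldl_cons, List.foldl_nil]
      rw [pvStep_spec]
      cases hf : (PySem.List.pyRange ((m.length : Int) - 5) (-1) (-1)).find?
          (fun r => decide (pvHit m r (k : Int))) with
      | none =>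
          dsimp only
          rw [List.find?_eq_none] at hf
          have hnone : ∀ r : Int, 0 ≤ r → r ≤ (m.length : Int) - 5 → ¬ pvHit m r (k : Int) := by
            intro r hr0 hr5 hh
            have := hf r (by rw [PySem.List.mem_pyRange_neg_one]; omega)
            simp only [decide_eq_true_eq] at this
            exact this hh
          cases ho : (PySem.List.pyRange 0 (k : Int) 1).foldl (pvStep m) none with
          | none =>
              rw [ho] at ih
              intro r s hr0 hr5 hs0 hsk
              by_cases hs : s < (k : Int)
              · exact ih r s hr0 hr5 hs0 hs
              · have : s = (k : Int) := by omega
                subst this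
                exact hnone r hr0 hr5
          | some b =>
              rw [ho] at ih
              dsimp only [pvInv] at ih ⊢
              obtain ⟨h1, h2, h3, h4, h5, h6, h7⟩ := ih
              refine ⟨h1, h2, h3, by omega, h5, h6, ?_⟩
              intro r' s' hr0 hr5 hs0 hsk hh
              by_cases hs : s' < (k : Int)
              · exact h7 r' s' hr0 hr5 hs0 hs hh
              · have : s' = (k : Int) := by omega
                subst this
                exact absurd hh (hnone r' hr0 hr5)
      | some r =>
          dsimp only
          obtain ⟨hp, hmem, hmax⟩ := find?_max (· > ·) _ (pairwise_gt_countdown _ _) _ _ hf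
          rw [PySem.List.mem_pyRange_neg_one] at hmem
          have hhit : pvHit m r (k : Int) := by simpa using hp
          have hcolmax : ∀ r' : Int, 0 ≤ r' → r' ≤ (m.length : Int) - 5 →
              pvHit m r' (k : Int) → r' ≤ r := by
            intro r' hr0 hr5 hh
            rcases hmax r' (by rw [PySem.List.mem_pyRange_neg_one]; omega) (by simpa using hh)
              with h | h
            · omega
            · omega
          cases ho : (PySem.List.pyRange 0 (k : Int) 1).foldl (pvStep m) none with
          | none =>
              rw [ho] at ih
              refine ⟨by dsimp only; omega, by dsimp only; omega, by positivity,
                by dsimp only; omega, hhit, rfl, ?_⟩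
              dsimp only
              intro r' s' hr0 hr5 hs0 hsk hh
              by_cases hs : s' < (k : Int)
              · exact absurd hh (ih r' s' hr0 hr5 hs0 hs)
              · have : s' = (k : Int) := by omega
                subst this
                have := hcolmax r' hr0 hr5 hh
                rcases lt_or_eq_of_le this with h | h
                · exact Or.inl h
                · exact Or.inr ⟨h, le_refl _⟩
          | some b =>
              obtain ⟨br, bg, bs⟩ := b
              rw [ho] at ih
              dsimp only [pvInv] at ih ⊢
              obtain ⟨h1, h2, h3, h4, h5, h6, h7⟩ := ih
              by_cases hbr : br ≤ r
              · rw [if_pos hbr]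
                refine ⟨by dsimp only; omega, by dsimp only; omega, by positivity,
                  by dsimp only; omega, hhit, rfl, ?_⟩
                dsimp only
                intro r' s' hr0 hr5 hs0 hsk hh
                by_cases hs : s' < (k : Int)
                · rcases h7 r' s' hr0 hr5 hs0 hs hh with h | h
                  · omega
                  · omega
                · have : s' = (k : Int) := by omega
                  subst this
                  have := hcolmax r' hr0 hr5 hh
                  omega
              · rw [if_neg hbr]
                refine ⟨h1, h2, h3, by dsimp only; omega, h5, h6, ?_⟩
                dsimp only
                intro r' s' hr0 hr5 hs0 hsk hh
                by_cases hs : s' < (k : Int)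
                · exact h7 r' s' hr0 hr5 hs0 hs hh
                · have : s' = (k : Int) := by omega
                  subst this
                  have := hcolmax r' hr0 hr5 hh
                  exact Or.inl (by omega)

-- A's reversed pair list: rows then columns descending
def pvRevPairs (m : List (List Int)) : List (Int × Int) :=
  (PySem.List.pyRange ((m.length : Int) - 5) (-1) (-1)).flatMap
    (fun r => (PySem.List.pyRange ((m.length : Int) - 1) (-1) (-1)).map (fun s => (r, s)))

def pvLexGT (p q : Int × Int) : Prop := q.1 < p.1 ∨ (q.1 = p.1 ∧ q.2 < p.2)

lemma mem_revPairs (m : List (List Int)) (q : Int × Int) :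
    q ∈ pvRevPairs m ↔ (0 ≤ q.1 ∧ q.1 ≤ (m.length : Int) - 5 ∧ 0 ≤ q.2 ∧ q.2 < (m.length : Int)) := by
  obtain ⟨q1, q2⟩ := q
  simp only [pvRevPairs, List.mem_flatMap, List.mem_map, PySem.List.mem_pyRange_neg_one]
  constructor
  · rintro ⟨r, ⟨hr1, hr2⟩, s, ⟨hs1, hs2⟩, h⟩
    obtain ⟨rfl, rfl⟩ : r = q1 ∧ s = q2 := by cases h; exact ⟨rfl, rfl⟩
    exact ⟨by omega, by omega, by omega, by omega⟩
  · rintro ⟨h1, h2, h3, h4⟩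
    exact ⟨q1, ⟨by omega, h2⟩, q2, ⟨by omega, by omega⟩, rfl⟩

lemma pairwise_revPairs (m : List (List Int)) : (pvRevPairs m).Pairwise pvLexGT := by
  rw [pvRevPairs, List.pairwise_flatMap]
  constructor
  · intro r _
    rw [List.pairwise_map]
    exact (pairwise_gt_countdown _ _).imp (fun h => Or.inr ⟨rfl, h⟩)
  · refine (pairwise_gt_countdown _ _).imp ?_
    intro a b hab x hx y hy
    simp only [List.mem_map] at hx hy
    obtain ⟨sx, _, rfl⟩ := hx
    obtain ⟨sy, _, rfl⟩ := hy
    exact Or.inl hab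

-- the reverse of the forward pair list is the reversed (countdown) pair list
lemma pairs_reverse (m : List (List Int)) :
    ((PySem.List.pyRange 0 ((m.length : Int) - 4) 1).flatMap
        (fun r => (PySem.List.pyRange 0 (m.length : Int) 1).map (fun s => (r, s)))).reverse
      = pvRevPairs m := by
  unfold pvRevPairs
  have h1 : PySem.List.pyRange ((m.length : Int) - 5) (-1) (-1)
      = (PySem.List.pyRange 0 ((m.length : Int) - 4) 1).reverse := by
    rw [PySem.List.pyRange_neg_one_eq_reverse]
    have e : (m.length : Int) - 5 + 1 = (m.length : Int) - 4 := by ring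
    rw [e]; norm_num
  have h2 : PySem.List.pyRange ((m.length : Int) - 1) (-1) (-1)
      = (PySem.List.pyRange 0 (m.length : Int) 1).reverse := by
    rw [PySem.List.pyRange_neg_one_eq_reverse]; norm_num
  rw [h1, h2, List.reverse_flatMap]
  simp [Function.comp_def, List.map_reverse]

-- A reduced to a single find? over the reversed pair list
lemma checky_norm (m : List (List Int)) :
    checky m = (((pvRevPairs m).find? (fun p => decide (pvHit m p.1 p.2))).map
        (fun p => pvVal m p.1 p.2)).getD (none, none) := by
  unfold checky
  have hstep : ∀ r acc,
      (PySem.List.pyRange 0 (m.length : Int) 1).foldl (fun acc s =>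
        let acc := if pvCell m r s = 1 ∧ pvCell m (r+1) s = 1 ∧ pvCell m (r+2) s = 1 ∧
                      pvCell m (r+3) s = 1 ∧ pvCell m (r+4) s = 0 then (some (r+4), some s) else acc
        let acc := if pvCell m r s = 1 ∧ pvCell m (r+1) s = 1 ∧ pvCell m (r+2) s = 1 ∧
                      pvCell m (r+3) s = 0 ∧ pvCell m (r+4) s = 1 then (some (r+3), some s) else acc
        let acc := if pvCell m r s = 1 ∧ pvCell m (r+1) s = 1 ∧ pvCell m (r+2) s = 0 ∧
                      pvCell m (r+3) s = 1 ∧ pvCell m (r+4) s = 1 then (some (r+2), some s) else acc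
        let acc := if pvCell m r s = 1 ∧ pvCell m (r+1) s = 0 ∧ pvCell m (r+2) s = 1 ∧
                      pvCell m (r+3) s = 1 ∧ pvCell m (r+4) s = 1 then (some (r+1), some s) else acc
        let acc := if pvCell m r s = 0 ∧ pvCell m (r+1) s = 1 ∧ pvCell m (r+2) s = 1 ∧
                      pvCell m (r+3) s = 1 ∧ pvCell m (r+4) s = 1 then (some r, some s) else acc
        acc) acc
      = (PySem.List.pyRange 0 (m.length : Int) 1).foldl
          (fun acc s => if pvHit m r s then pvVal m r s else acc) acc := by
    intro r acc
    congr 1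
    funext acc s
    have h := chain5 (pvCell m r s) (pvCell m (r+1) s) (pvCell m (r+2) s) (pvCell m (r+3) s)
      (pvCell m (r+4) s) r s acc
    simpa [pvHit, pvVal, pvGap, pvCol] using h
  simp only [hstep]
  rw [foldl_pairs,
      foldl_if_last (fun p : Int × Int => pvHit m p.1 p.2) (fun p => pvVal m p.1 p.2),
      pairs_reverse]

-- B reduced to the outer fold of pvStep (for n ≥ 5)
lemma checky_alt_norm (m : List (List Int)) (h : ¬ ((m.length : Int) < 5)) :
    checky_alt m
      = match (PySem.List.pyRange 0 (m.length : Int) 1).foldl (pvStep m) none with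
        | some b => (some b.2.1, some b.2.2)
        | none => (none, none) := by
  unfold checky_alt
  rw [if_neg h]
  have hb : (fun (best : Option (Int × Int × Int)) (s : Int) =>
      let st := (PySem.List.pyRange 0 ((m.length : Nat) : Int) 1).foldl
        (fun (st : List Int × List Int × List Int × Int) r =>
          let v := pvCell m r s
          let p1 := st.1 ++ [PySem.List.pyGetD st.1 (-1) 0 + (if v = 1 then 1 else 0)]
          let p0 := st.2.1 ++ [PySem.List.pyGetD st.2.1 (-1) 0 + (if v = 0 then 1 else 0)]
          let lz := if v = 0 then r else st.2.2.2
          (p1, p0, st.2.2.1 ++ [lz], lz))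
        (([0], [0], [], -1) : List Int × List Int × List Int × Int)
      match (PySem.List.pyRange (((m.length : Nat) : Int) - 5) (-1) (-1)).find? (fun r =>
          decide (PySem.List.pyGetD st.1 (r + 5) 0 - PySem.List.pyGetD st.1 r 0 = 4 ∧
                  PySem.List.pyGetD st.2.1 (r + 5) 0 - PySem.List.pyGetD st.2.1 r 0 = 1)) with
      | some r =>
          match best with
          | none => some (r, PySem.List.pyGetD st.2.2.1 (r + 4) 0, s)
          | some b => if b.1 ≤ r then some (r, PySem.List.pyGetD st.2.2.1 (r + 4) 0, s) else best
      | none => best) = pvStep m := by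
    funext best s
    rw [inner_eq m s m.length]
    rfl
  rw [hb]

-- ===== VERDICT (by name: the statement is the Claim_ definition above) =====
theorem checky_spec : Claim_equal_checky := by
  intro m _hdom _hpre
  unfold Spec_checky
  by_cases h5 : (m.length : Int) < 5
  · have hpairs : pvRevPairs m = [] := by
      unfold pvRevPairs
      rw [PySem.List.pyRange_neg_one_eq_nil (by omega : (m.length : Int) - 5 ≤ -1)]
      rfl
    have hA : checky m = (none, none) := by
      rw [checky_norm, hpairs]
      rfl
    have hB : checky_alt m = (none, none) := by
      unfold checky_alt
      rw [if_pos h5]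
    rw [hA, hB]
  · rw [checky_norm, checky_alt_norm m h5]
    have hinv := inv_fold m m.length
    cases hbest : (PySem.List.pyRange 0 ((m.length : Nat) : Int) 1).foldl (pvStep m) none with
    | none =>
        rw [hbest] at hinv
        have hfind : (pvRevPairs m).find? (fun p => decide (pvHit m p.1 p.2)) = none := by
          rw [List.find?_eq_none]
          intro q hq
          rw [mem_revPairs] at hq
          simp only [decide_eq_true_eq]
          exact hinv q.1 q.2 hq.1 hq.2.1 hq.2.2.1 hq.2.2.2
        rw [hfind]
        rfl
    | some b =>
        obtain ⟨r, g, s⟩ := b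
        rw [hbest] at hinv
        dsimp only [pvInv] at hinv
        obtain ⟨hr0, hr5, hs0, hsk, hhit, hgap, hmax⟩ := hinv
        cases hA : (pvRevPairs m).find? (fun p => decide (pvHit m p.1 p.2)) with
        | none =>
            rw [List.find?_eq_none] at hA
            exact absurd (by simpa using hhit)
              (by simpa using hA (r, s) ((mem_revPairs m (r, s)).mpr ⟨hr0, hr5, hs0, hsk⟩))
        | some q =>
            obtain ⟨hq, hqm, hqmax⟩ := find?_max pvLexGT _ (pairwise_revPairs m) _ _ hA
            obtain ⟨q1, q2⟩ := q
            rw [mem_revPairs] at hqm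
            have hq' : pvHit m q1 q2 := by simpa using hq
            have h1 := hmax q1 q2 hqm.1 hqm.2.1 hqm.2.2.1 hqm.2.2.2 hq'
            have h2 := hqmax (r, s) ((mem_revPairs m (r, s)).mpr ⟨hr0, hr5, hs0, hsk⟩)
              (by simpa using hhit)
            have heq : q1 = r ∧ q2 = s := by
              rcases h2 with heq | hlt
              · have := Prod.mk.injEq .. ▸ heq
                exact ⟨(Prod.mk.injEq .. ▸ heq.symm).1, (Prod.mk.injEq .. ▸ heq.symm).2⟩
              · unfold pvLexGT at hlt
                simp only at hlt
                omega
            obtain ⟨rfl, rfl⟩ := heq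
            simp [pvVal, hgap]
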